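-- pv_equiv track=rewrite | github.com/mayank88-py/leetcode-top-interview-150 | bit_manipulation/191_number_of_1_bits.py | hamming_weight_bit_manipulation
-- ===== SOURCE A (Python) =====
-- def hamming_weight_bit_manipulation(n):
--     """
--     Approach 3: Bit Manipulation with Mask
--     Time Complexity: O(32) = O(1)
--     Space Complexity: O(1)
--
--     Use a mask to check each bit position.
--     """
--     count = 0
--     mask = 1
--     for _ in range(32):
--         if n & mask:
--             count += 1
--         mask <<= 1
--     return count
-- ===== SOURCE B (Python) =====
-- def hamming_weight_bit_manipulation(n):
--     # Brian Kernighan: clear the lowest set bit of the 32-bit window until zero.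
--     m = n & 0xFFFFFFFF
--     count = 0
--     while m:
--         m &= m - 1
--         count += 1
--     return count
-- ===== Notes on version B (the rewrite author's own statement) =====
-- stated objective: alternative
-- what changed: Replaces the fixed 32-iteration mask scan with Brian Kernighan's loop on the masked value, which clears one set bit per iteration and stops at zero.
import Mathlib
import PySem

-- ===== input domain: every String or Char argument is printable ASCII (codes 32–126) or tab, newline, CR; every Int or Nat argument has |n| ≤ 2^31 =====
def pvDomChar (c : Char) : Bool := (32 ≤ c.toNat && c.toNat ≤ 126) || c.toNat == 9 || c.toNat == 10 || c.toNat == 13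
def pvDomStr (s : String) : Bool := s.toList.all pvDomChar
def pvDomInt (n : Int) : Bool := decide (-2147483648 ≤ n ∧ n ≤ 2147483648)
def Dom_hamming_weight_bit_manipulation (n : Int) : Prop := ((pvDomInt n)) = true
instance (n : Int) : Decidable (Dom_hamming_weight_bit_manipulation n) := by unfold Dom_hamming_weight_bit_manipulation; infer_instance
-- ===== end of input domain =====

-- B replaces A's fixed 32-iteration mask scan with Brian Kernighan's clear-lowest-set-bit loop
-- on the masked 32-bit value (objective: alternative algorithm, same asymptotic cost).


-- ===== PORT A =====
-- literal transliteration: count = 0, mask = 1; for _ in range(32): if n & mask: count += 1; mask <<= 1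
def hamming_weight_bit_manipulation (n : Int) : Int :=
  (((PySem.List.pyRange 0 32 1).foldl
      (fun (st : Int × Int) _ =>
        (if PySem.Int.band n st.2 ≠ 0 then st.1 + 1 else st.1, st.2 <<< (1 : Nat)))
      ((0 : Int), (1 : Int)))).1

-- ===== PORT B =====
-- the while loop of Source B; m = n & 0xFFFFFFFF is nonnegative, so the loop state lives in Nat
def kernLoop (m : Nat) (c : Nat) : Nat :=
  if m = 0 then c else kernLoop (m &&& (m - 1)) (c + 1)
  termination_by m
  decreasing_by exact Nat.lt_of_le_of_lt Nat.and_le_right (by omega)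

def hamming_weight_bit_manipulation_alt (n : Int) : Int :=
  ((kernLoop (PySem.Int.band n 4294967295).toNat 0 : Nat) : Int)

-- ===== PRECONDITION & SPEC =====
def Spec_hamming_weight_bit_manipulation (n : Int) (out : Int) : Prop := out = hamming_weight_bit_manipulation_alt n
instance (n : Int) (out : Int) : Decidable (Spec_hamming_weight_bit_manipulation n out) := by unfold Spec_hamming_weight_bit_manipulation; infer_instance

-- ===== CLAIM (what is proved, stated in full; the proofs are below) =====
def Claim_equal_hamming_weight_bit_manipulation : Prop := ∀ (n : Int), Dom_hamming_weight_bit_manipulation n → Spec_hamming_weight_bit_manipulation n (hamming_weight_bit_manipulation n)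

-- ===== LEMMAS AND PROOFS =====

-- popcount, peeling the low bit; the common value both ports are shown to compute
def pc : Nat → Nat
  | 0 => 0
  | m + 1 => pc ((m + 1) / 2) + (m + 1) % 2
  decreasing_by exact Nat.div_lt_self (Nat.succ_pos m) (by omega)

theorem pc_pos (m : Nat) (h : 0 < m) : pc m = pc (m / 2) + m % 2 := by
  cases m with
  | zero => omega
  | succ k => rw [pc]

theorem pc_two_mul (x : Nat) : pc (2 * x) = pc x := by
  cases x with
  | zero => rfl
  | succ k => rw [pc_pos (2 * (k + 1)) (by omega)]; simp [Nat.mul_mod_right]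

-- m odd: m & (m-1) = m - 1
theorem land_pred_odd (m : Nat) (h : m % 2 = 1) : m &&& (m - 1) = m - 1 := by
  apply Nat.eq_of_testBit_eq
  intro i
  cases i with
  | zero =>
    simp [Nat.testBit_zero]
    omega
  | succ i =>
    rw [Nat.testBit_land, Nat.testBit_succ, Nat.testBit_succ]
    have : (m - 1) / 2 = m / 2 := by omega
    rw [this, Bool.and_self]

-- m even > 0: m & (m-1) = 2 * ((m/2) & (m/2 - 1))
theorem land_pred_even (m : Nat) (h : m % 2 = 0) (hp : 0 < m) :
    m &&& (m - 1) = 2 * ((m / 2) &&& (m / 2 - 1)) := by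
  apply Nat.eq_of_testBit_eq
  intro i
  cases i with
  | zero =>
    rw [Nat.testBit_land, Nat.testBit_zero, Nat.testBit_zero]
    simp [Nat.mul_mod_right]
    omega
  | succ i =>
    rw [Nat.testBit_land, Nat.testBit_succ, Nat.testBit_succ, Nat.testBit_succ,
      Nat.mul_div_cancel_left _ (by omega : 0 < 2), Nat.testBit_land]
    have : (m - 1) / 2 = m / 2 - 1 := by omega
    rw [this]

theorem pc_land_pred (m : Nat) (h : 0 < m) : pc (m &&& (m - 1)) + 1 = pc m := by
  induction m using Nat.strong_induction_on with
  | _ m ih =>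
    rcases Nat.even_or_odd m with he | ho
    · have h2 : m % 2 = 0 := Nat.even_iff.mp he
      rw [land_pred_even m h2 h, pc_two_mul]
      have hm2 : 0 < m / 2 := by omega
      rw [ih (m / 2) (by omega) hm2]
      conv_rhs => rw [show m = 2 * (m / 2) by omega, pc_two_mul]
    · have h2 : m % 2 = 1 := Nat.odd_iff.mp ho
      rw [land_pred_odd m h2, pc_pos m h, h2]
      rcases Nat.eq_or_lt_of_le h with h1 | h1
      · simp [← h1, pc]
      · rw [pc_pos (m - 1) (by omega)]
        have : (m - 1) / 2 = m / 2 := by omega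
        rw [this]
        omega

theorem kernLoop_eq_pc (m : Nat) : ∀ c, kernLoop m c = c + pc m := by
  induction m using Nat.strong_induction_on with
  | _ m ih =>
    intro c
    rw [kernLoop]
    by_cases h : m = 0
    · simp [h, pc]
    · simp only [h, if_false]
      rw [ih (m &&& (m - 1)) (Nat.lt_of_le_of_lt Nat.and_le_right (by omega))]
      have := pc_land_pred m (by omega)
      omega

-- pc of a k-bit number is the sum of its first k bits
theorem pc_eq_sum_testBit : ∀ (k m : Nat), m < 2 ^ k →
    pc m = ∑ i ∈ Finset.range k, (m.testBit i).toNat := by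
  intro k
  induction k with
  | zero =>
    intro m hm
    interval_cases m
    simp [pc]
  | succ k ih =>
    intro m hm
    by_cases h0 : m = 0
    · simp [h0, pc, Nat.testBit]
    · rw [pc_pos m (by omega), ih (m / 2) (by
        have := Nat.pow_succ 2 k
        omega), Finset.sum_range_succ']
      have hb : (m.testBit 0).toNat = m % 2 := by
        rw [Nat.testBit_zero]
        rcases Nat.mod_two_eq_zero_or_one m with h | h <;> simp [h]
      have hs : ∀ i, m.testBit (i + 1) = (m / 2).testBit i := fun i => Nat.testBit_succ m i
      simp only [hs, hb]

-- the masked value is a 32-bit Nat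
theorem masked_lt (n : Int) : (PySem.Int.band n 4294967295).toNat < 2 ^ 32 := by
  unfold PySem.Int.band
  by_cases hn : 0 ≤ n
  · simp only [hn, if_true, (by decide : 0 ≤ (4294967295 : Int)), Int.toNat_natCast]
    have : n.toNat &&& (4294967295 : Int).toNat ≤ (4294967295 : Int).toNat := Nat.and_le_right
    omega
  · simp only [hn, if_false, (by decide : 0 ≤ (4294967295 : Int)), if_true, Int.toNat_natCast]
    omega

-- complement within k bits flips each of the first k bits
theorem compl_testBit (i : Nat) : ∀ (k s : Nat), i < k → s < 2 ^ k →
    (2 ^ k - 1 - s).testBit i = ! s.testBit i := by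
  induction i with
  | zero =>
    intro k s hi hs
    have h2 : 2 ^ k = 2 * 2 ^ (k - 1) := by
      rw [← pow_succ']
      congr 1
      omega
    simp only [Nat.testBit_zero]
    rcases Nat.mod_two_eq_zero_or_one s with h | h <;> (simp [h]; omega)
  | succ i ih =>
    intro k s hi hs
    have h2 : 2 ^ k = 2 * 2 ^ (k - 1) := by
      rw [← pow_succ']
      congr 1
      omega
    rw [Nat.testBit_succ, Nat.testBit_succ]
    have hd : (2 ^ k - 1 - s) / 2 = 2 ^ (k - 1) - 1 - s / 2 := by omega
    rw [hd]
    exact ih (k - 1) (s / 2) (by omega) (by omega)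

-- bit i (i < 32) of the masked value is exactly Python's truthiness of n & (1 << i)
theorem band_pow_iff (n : Int) (i : Nat) (hi : i < 32) :
    (PySem.Int.band n (2 ^ i) ≠ 0) ↔ (PySem.Int.band n 4294967295).toNat.testBit i = true := by
  have hp : (0 : Int) ≤ 2 ^ i := by positivity
  have hfull : (4294967295 : Int).toNat = 2 ^ 32 - 1 := by rfl
  have hpow : ((2 : Int) ^ i).toNat = 2 ^ i := by
    rw [show ((2:Int) ^ i) = ((2 ^ i : Nat) : Int) by push_cast; ring, Int.toNat_natCast]
  have hpos : 0 < 2 ^ i := Nat.two_pow_pos i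
  unfold PySem.Int.band
  by_cases hn : 0 ≤ n
  · simp only [hn, if_true, hp, (by decide : 0 ≤ (4294967295 : Int)), Int.toNat_natCast, hpow, hfull]
    rw [Nat.and_two_pow_sub_one_eq_mod, Nat.testBit_mod_two_pow]
    rw [Nat.and_two_pow n.toNat i]
    simp only [hi, decide_true, Bool.true_and]
    cases hb : n.toNat.testBit i <;> simp
  · simp only [hn, if_false, hp, if_true, (by decide : 0 ≤ (4294967295 : Int)), Int.toNat_natCast, hpow, hfull]
    set t := (-n - 1).toNat with ht
    rw [Nat.and_comm (2 ^ 32 - 1) t, Nat.and_two_pow_sub_one_eq_mod]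
    rw [Nat.two_pow_and t i]
    have hlt : t % 2 ^ 32 < 2 ^ 32 := Nat.mod_lt _ (by positivity)
    rw [compl_testBit i 32 (t % 2 ^ 32) hi hlt, Nat.testBit_mod_two_pow]
    simp only [hi, decide_true, Bool.true_and]
    cases hb : t.testBit i <;> simp

-- the A-side fold, generalized over the list (the element is unused) and the mask exponent
theorem foldA (n : Int) : ∀ (L : List Int) (c : Int) (j : Nat),
    (L.foldl
      (fun (st : Int × Int) _ =>
        (if PySem.Int.band n st.2 ≠ 0 then st.1 + 1 else st.1, st.2 <<< (1 : Nat)))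
      (c, (2 : Int) ^ j)).1
    = c + ∑ i ∈ Finset.range L.length, (if PySem.Int.band n (2 ^ (j + i)) ≠ 0 then (1 : Int) else 0) := by
  intro L
  induction L with
  | nil => intro c j; simp
  | cons a L ih =>
    intro c j
    simp only [List.foldl_cons, List.length_cons]
    have hshift : ((2 : Int) ^ j) <<< (1 : Nat) = (2 : Int) ^ (j + 1) := by
      rw [Int.shiftLeft_eq]
      ring
    rw [hshift, ih _ (j + 1), Finset.sum_range_succ']
    simp only [show ∀ i, j + 1 + i = j + (i + 1) by omega, Nat.add_zero]
    by_cases h : PySem.Int.band n (2 ^ j) ≠ 0 <;> simp [h]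
    ring_nf

-- ===== VERDICT (by name: the statement is the Claim_ definition above) =====
theorem hamming_weight_bit_manipulation_spec : Claim_equal_hamming_weight_bit_manipulation := by
  intro n _
  unfold Spec_hamming_weight_bit_manipulation hamming_weight_bit_manipulation hamming_weight_bit_manipulation_alt
  rw [kernLoop_eq_pc, Nat.zero_add, pc_eq_sum_testBit 32 _ (masked_lt n)]
  have hf := foldA n (PySem.List.pyRange 0 32 1) 0 0
  simp only [pow_zero, Nat.zero_add] at hf
  rw [hf]
  have hlen : (PySem.List.pyRange 0 32 1).length = 32 := by decide
  rw [hlen, zero_add]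
  push_cast
  apply Finset.sum_congr rfl
  intro i hi
  have hi32 : i < 32 := Finset.mem_range.mp hi
  by_cases h : PySem.Int.band n (2 ^ i) ≠ 0
  · rw [if_pos h, (band_pow_iff n i hi32).mp h]
    simp
  · rw [if_neg h]
    cases hb : (PySem.Int.band n 4294967295).toNat.testBit i with
    | false => simp
    | true => exact absurd ((band_pow_iff n i hi32).mpr hb) h
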